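-- pv_equiv track=rewrite | github.com/divlogic/automatetheboringstuffexercises | coinFlipStreaks.py | findStreak
-- ===== SOURCE A (Python) =====
-- def findStreak(flips):
--     streaksCount = 0
--     activeStreakLength = 0
--     previousItem = None
--     for index, currentItem in enumerate(flips):
--         if currentItem == previousItem:
--             activeStreakLength += 1
--         else:
--             activeStreakLength = 0
--
--         if activeStreakLength == 5:
--             streaksCount += 1
--         previousItem = currentItem
--
--     return streaksCount
-- ===== SOURCE B (Python) =====
-- def findStreak(flips):
--     # run-length encode the flips, then count the runs of length >= 6
--     runs = []
--     for x in flips: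
--         if runs and runs[-1][0] == x:
--             y, k = runs[-1]
--             runs[-1] = (y, k + 1)
--         else:
--             runs.append((x, 1))
--     return len([r for r in runs if r[1] >= 6])
-- ===== Notes on version B (the rewrite author's own statement) =====
-- stated objective: alternative
-- what changed: B builds a run-length encoding of the flips and then counts the runs of length >= 6, instead of A's single streak counter with a reset and an ==5 trigger.
import Mathlib
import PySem

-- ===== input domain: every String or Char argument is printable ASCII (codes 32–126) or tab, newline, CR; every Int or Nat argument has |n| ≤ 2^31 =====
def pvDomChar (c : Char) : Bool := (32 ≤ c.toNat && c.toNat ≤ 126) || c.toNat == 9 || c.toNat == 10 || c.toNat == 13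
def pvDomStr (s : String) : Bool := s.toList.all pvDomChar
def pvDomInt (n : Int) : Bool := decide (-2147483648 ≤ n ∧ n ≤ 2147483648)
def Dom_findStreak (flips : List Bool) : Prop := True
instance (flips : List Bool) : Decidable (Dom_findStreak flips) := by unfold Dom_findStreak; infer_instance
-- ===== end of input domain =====

-- B replaces A's streak counter (reset + ==5 trigger) by a run-length encoding pass followed by
-- counting runs of length >= 6 (alternative decomposition; same cost).


-- ===== PORT A =====
-- state: (streaksCount, activeStreakLength, previousItem); 'currentItem == previousItem' with
-- previousItem initially None is ported as Option equality (a Bool never equals None in Python)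
def fsStep (st : Int × Int × Option Bool) (x : Bool) : Int × Int × Option Bool :=
  let a := if st.2.2 = some x then st.2.1 + 1 else 0
  let s := if a = 5 then st.1 + 1 else st.1
  (s, a, some x)

def findStreak (flips : List Bool) : Int :=
  (flips.foldl fsStep (0, 0, none)).1

-- ===== PORT B =====
-- one step of the run-length encoding: extend the last run or start a new one
def rleStep (rs : List (Bool × Int)) (x : Bool) : List (Bool × Int) :=
  match rs.getLast? with
  | some (y, k) => if y = x then rs.dropLast ++ [(y, k + 1)] else rs ++ [(x, 1)]
  | none => [(x, 1)]

def findStreak_alt (flips : List Bool) : Int :=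
  (((flips.foldl rleStep []).filter (fun r => 6 ≤ r.2)).length : Int)

-- ===== PRECONDITION & SPEC =====
def Spec_findStreak (flips : List Bool) (out : Int) : Prop := out = findStreak_alt flips
instance (flips : List Bool) (out : Int) : Decidable (Spec_findStreak flips out) := by unfold Spec_findStreak; infer_instance

-- ===== CLAIM (what is proved, stated in full; the proofs are below) =====
def Claim_equal_findStreak : Prop := ∀ (flips : List Bool), Dom_findStreak flips → Spec_findStreak flips (findStreak flips)

-- ===== LEMMAS AND PROOFS =====

-- number of runs of length ≥ 6 in a run list
def cnt (rs : List (Bool × Int)) : Int := ((rs.filter (fun r => 6 ≤ r.2)).length : Int)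

theorem cnt_concat (rs : List (Bool × Int)) (p : Bool × Int) :
    cnt (rs ++ [p]) = cnt rs + (if 6 ≤ p.2 then 1 else 0) := by
  simp [cnt, List.filter_append]
  split_ifs with h <;> simp [List.filter, h]

theorem main_inv : ∀ (xs : List Bool) (rs : List (Bool × Int)) (v : Bool) (k s : Int),
    1 ≤ k → s = cnt (rs ++ [(v, k)]) →
    (xs.foldl fsStep (s, k - 1, some v)).1 = cnt (xs.foldl rleStep (rs ++ [(v, k)])) := by
  intro xs
  induction xs with
  | nil => intro rs v k s _ hs; simpa using hs
  | cons x xs ih =>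
    intro rs v k s hk hs
    by_cases hv : v = x
    · subst hv
      have e : k - 1 + 1 = k := by omega
      have hstep : fsStep (s, k - 1, some v) v =
          (if k = 5 then s + 1 else s, k, some v) := by
        simp [fsStep, e]
      have hrle : rleStep (rs ++ [(v, k)]) v = rs ++ [(v, k + 1)] := by
        simp [rleStep]
      rw [List.foldl_cons, List.foldl_cons, hstep, hrle]
      have hk1 : (k + 1) - 1 = k := by omega
      have := ih rs v (k + 1) (if k = 5 then s + 1 else s) (by omega) (by
        rw [cnt_concat] at hs ⊢
        split_ifs at hs ⊢ <;> omega)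
      rwa [hk1] at this
    · have hstep : fsStep (s, k - 1, some v) x = (s, 0, some x) := by
        simp [fsStep, hv]
      have hrle : rleStep (rs ++ [(v, k)]) x = (rs ++ [(v, k)]) ++ [(x, 1)] := by
        simp [rleStep, hv]
      rw [List.foldl_cons, List.foldl_cons, hstep, hrle]
      have h0 : (0 : Int) = 1 - 1 := by omega
      rw [h0]
      exact ih (rs ++ [(v, k)]) x 1 s (by omega) (by rw [cnt_concat]; simp; omega)

-- ===== VERDICT (by name: the statement is the Claim_ definition above) =====
theorem findStreak_spec : Claim_equal_findStreak := by
  intro flips _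
  unfold Spec_findStreak findStreak findStreak_alt
  cases flips with
  | nil => simp
  | cons x xs =>
    have h1 : fsStep (0, 0, none) x = (0, 0, some x) := by simp [fsStep]
    have h2 : rleStep [] x = [(x, 1)] := by simp [rleStep]
    rw [List.foldl_cons, List.foldl_cons, h1, h2]
    have h0 : (0 : Int) = 1 - 1 := by omega
    have := main_inv xs [] x 1 0 (by omega) (by simp [cnt])
    rw [h0]
    exact this.trans rfl
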